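-- pv_equiv track=rewrite | github.com/alee0151/ecotrace | backend/ecotrace_pipeline.py | _move_to_sentence_boundary
-- ===== SOURCE A (Python) =====
-- def _move_to_sentence_boundary(
--
--     text: str,
--     boundary: int,
--     anchor: int,
--     forward: bool = False,
-- ) -> int:
--     if boundary <= 0 or boundary >= len(text):
--         return max(0, min(boundary, len(text)))
--
--     punctuation = ".;:!?"
--     if forward:
--         search_start = max(0, boundary - 300)
--         search_end = min(anchor, boundary + 300)
--         candidates = [
--             text.rfind(mark, search_start, search_end)
--             for mark in punctuation
--         ]
--         candidate = max(candidates)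
--         if candidate >= 0:
--             return min(len(text), candidate + 1)
--         return boundary
--
--     search_start = max(anchor, boundary - 300)
--     candidates = [
--         text.find(mark, search_start, boundary)
--         for mark in punctuation
--     ]
--     candidates = [candidate for candidate in candidates if candidate >= 0]
--     if candidates:
--         return min(len(text), min(candidates) + 1)
--     return boundary
-- ===== SOURCE B (Python) =====
-- def _move_to_sentence_boundary(
--     text: str,
--     boundary: int,
--     anchor: int,
--     forward: bool = False,
-- ) -> int:
--     n = len(text)
--     if boundary <= 0 or boundary >= n:
--         return max(0, min(boundary, n))
--
--     punctuation = ".;:!?"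
--     if forward:
--         lo = max(0, boundary - 300)
--         window = text[lo:min(anchor, boundary + 300)]
--         for i in range(len(window) - 1, -1, -1):
--             if window[i] in punctuation:
--                 return lo + i + 1
--         return boundary
--
--     window = text[max(anchor, boundary - 300):boundary]
--     base = boundary - len(window)
--     for i, ch in enumerate(window):
--         if ch in punctuation:
--             return base + i + 1
--     return boundary
-- ===== Notes on version B (the rewrite author's own statement) =====
-- stated objective: simpler
-- what changed: Replaces the five per-punctuation-mark rfind/find passes plus max/filter/min reduction with slicing the search window out once and scanning it directly (backwards for the last mark when forward=True, forwards for the first mark otherwise).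
import Mathlib
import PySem

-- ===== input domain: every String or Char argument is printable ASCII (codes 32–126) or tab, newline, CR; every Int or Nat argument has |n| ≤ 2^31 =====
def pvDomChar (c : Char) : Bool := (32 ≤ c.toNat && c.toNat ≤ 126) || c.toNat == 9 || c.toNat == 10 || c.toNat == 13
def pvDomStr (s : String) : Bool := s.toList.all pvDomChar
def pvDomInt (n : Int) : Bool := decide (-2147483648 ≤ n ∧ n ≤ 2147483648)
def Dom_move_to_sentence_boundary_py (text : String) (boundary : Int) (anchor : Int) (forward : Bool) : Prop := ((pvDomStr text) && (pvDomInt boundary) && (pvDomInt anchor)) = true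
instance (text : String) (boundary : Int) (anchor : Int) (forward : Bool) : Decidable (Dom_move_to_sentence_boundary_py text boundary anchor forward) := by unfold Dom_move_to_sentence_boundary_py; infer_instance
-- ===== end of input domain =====

-- B replaces A's five per-mark rfind/find passes plus max/filter/min reduction by slicing the
-- search window out once and scanning it directly for a sentence-ending character (objective: simpler).

-- ===== PORT A =====
-- punctuation = ".;:!?" iterated character by character
def pvMarks : List Char := ['.', ';', ':', '!', '?']

def move_to_sentence_boundary_py (text : String) (boundary : Int) (anchor : Int) (forward : Bool) : Int :=
  let n : Int := PySem.Str.len text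
  if boundary ≤ 0 ∨ n ≤ boundary then
    max 0 (min boundary n)
  else if forward then
    let search_start : Int := max 0 (boundary - 300)
    let search_end : Int := min anchor (boundary + 300)
    let candidates : List Int :=
      pvMarks.map (fun mark => PySem.Str.rfindFrom text (String.ofList [mark]) search_start (some search_end))
    match PySem.List.max? candidates (fun c => c) with
    | some candidate => if 0 ≤ candidate then min n (candidate + 1) else boundary
    | none => boundary       -- unreachable: candidates always has five elements
  else
    let search_start : Int := max anchor (boundary - 300)
    let candidates : List Int :=
      pvMarks.map (fun mark => PySem.Str.findFrom text (String.ofList [mark]) search_start (some boundary))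
    let kept : List Int := candidates.filter (fun candidate => 0 ≤ candidate)
    match PySem.List.min? kept (fun c => c) with
    | some c => min n (c + 1)
    | none => boundary

-- ===== PORT B =====
-- `for i in range(len(window) - 1, -1, -1): if window[i] in punctuation: return lo + i + 1`
-- (k counts down from len(window); k-1 is always in range, so the `getD` default is never used)
def pvScanBack (w punct : List Char) (lo : Int) : Nat → Int → Int
  | 0, d => d
  | k + 1, d =>
    if punct.contains (w.getD k ' ') then lo + (k : Int) + 1
    else pvScanBack w punct lo k d

-- `for i, ch in enumerate(window): if ch in punctuation: return base + i + 1`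
def pvScanFwd (punct : List Char) (base : Int) : List (Int × Char) → Int → Int
  | [], d => d
  | (i, c) :: t, d => if punct.contains c then base + i + 1 else pvScanFwd punct base t d

def move_to_sentence_boundary_py_alt (text : String) (boundary : Int) (anchor : Int) (forward : Bool) : Int :=
  let s := text.toList
  let n : Int := s.length
  if boundary ≤ 0 ∨ n ≤ boundary then
    max 0 (min boundary n)
  else
    let punctuation : List Char := ['.', ';', ':', '!', '?']
    if forward then
      let lo : Int := max 0 (boundary - 300)
      let window := PySem.List.slice s (some lo) (some (min anchor (boundary + 300)))
      pvScanBack window punctuation lo window.length boundary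
    else
      let window := PySem.List.slice s (some (max anchor (boundary - 300))) (some boundary)
      let base : Int := boundary - window.length
      pvScanFwd punctuation base (PySem.List.enumerate window 0) boundary

-- ===== PRECONDITION & SPEC =====
def Spec_move_to_sentence_boundary_py (text : String) (boundary : Int) (anchor : Int) (forward : Bool) (out : Int) : Prop := out = move_to_sentence_boundary_py_alt text boundary anchor forward
instance (text : String) (boundary : Int) (anchor : Int) (forward : Bool) (out : Int) : Decidable (Spec_move_to_sentence_boundary_py text boundary anchor forward out) := by unfold Spec_move_to_sentence_boundary_py; infer_instance

-- ===== CLAIM (what is proved, stated in full; the proofs are below) =====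
def Claim_equal_move_to_sentence_boundary_py : Prop := ∀ (text : String) (boundary : Int) (anchor : Int) (forward : Bool), Dom_move_to_sentence_boundary_py text boundary anchor forward → Spec_move_to_sentence_boundary_py text boundary anchor forward (move_to_sentence_boundary_py text boundary anchor forward)

-- ===== LEMMAS AND PROOFS =====

-- index of the LAST occurrence of m among w[0..k), else -1 (mirrors rfind's downward scan)
def pvLast1 (w : List Char) (m : Char) : Nat → Int
  | 0 => -1
  | k + 1 => if w[k]? = some m then (k : Int) else pvLast1 w m k

-- index of the LAST index j < k with w[j] ∈ P, else -1
def pvLastP (w : List Char) (P : List Char) : Nat → Int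
  | 0 => -1
  | k + 1 => if (match w[k]? with | some c => P.contains c | none => false) then (k : Int) else pvLastP w P k

-- index of the FIRST occurrence of m in w, else -1
def pvFirst1 (w : List Char) (m : Char) : Int :=
  match w with
  | [] => -1
  | c :: t => if c = m then 0 else (if pvFirst1 t m = -1 then -1 else pvFirst1 t m + 1)

-- index of the FIRST j with w[j] ∈ P, else -1
def pvFirstP (w : List Char) (P : List Char) : Int :=
  match w with
  | [] => -1
  | c :: t => if P.contains c then 0 else (if pvFirstP t P = -1 then -1 else pvFirstP t P + 1)

lemma prefix_single (w : List Char) (m : Char) (j : Nat) :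
    [m].isPrefixOf (w.drop j) = true ↔ w[j]? = some m := by
  rw [List.isPrefixOf_iff_prefix]
  cases hd : w.drop j with
  | nil =>
    have hj : w.length ≤ j := List.drop_eq_nil_iff.mp hd
    have hnone : w[j]? = none := List.getElem?_eq_none hj
    rw [hnone]
    simp
  | cons a t =>
    have h0 : w[j]? = some a := by
      have h1 : (w.drop j)[0]? = some a := by rw [hd]; rfl
      rwa [List.getElem?_drop, Nat.add_zero] at h1
    rw [h0]
    constructor
    · rintro ⟨t', ht'⟩
      have hma : m = a := by
        have := congrArg (fun l => l[0]?) ht'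
        simpa using this
      rw [hma]
    · intro h
      cases Option.some.inj h
      exact ⟨t, rfl⟩

lemma rfind_go_eq (w : List Char) (m : Char) : ∀ j, PySem.Chars.rfind.go w [m] j = pvLast1 w m (j + 1) := by
  intro j
  induction j with
  | zero =>
    have h0 : ([m].isPrefixOf w = true) ↔ w[0]? = some m := by
      simpa using prefix_single w m 0
    simp only [PySem.Chars.rfind.go, pvLast1, h0]
    norm_num
  | succ j ih =>
    simp only [PySem.Chars.rfind.go, pvLast1, prefix_single w m (j + 1), ih]

lemma rfind_single (w : List Char) (m : Char) :
    PySem.Chars.rfind w [m] = pvLast1 w m w.length := by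
  rw [PySem.Chars.rfind, rfind_go_eq]
  simp [pvLast1]

lemma pvLast1_bounds (w : List Char) (m : Char) (k : Nat) :
    -1 ≤ pvLast1 w m k ∧ pvLast1 w m k < k := by
  induction k with
  | zero => simp [pvLast1]
  | succ k ih =>
    simp only [pvLast1]
    split
    · constructor <;> push_cast <;> omega
    · obtain ⟨h1, h2⟩ := ih; constructor <;> push_cast <;> omega

lemma pvLastP_bounds (w P : List Char) (k : Nat) :
    -1 ≤ pvLastP w P k ∧ pvLastP w P k < k := by
  induction k with
  | zero => simp [pvLastP]
  | succ k ih =>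
    obtain ⟨h1, h2⟩ := ih
    rw [show pvLastP w P (k + 1)
        = if (match w[k]? with | some c => P.contains c | none => false) = true then ((k : Nat) : Int) else pvLastP w P k from rfl]
    split_ifs <;> constructor <;> push_cast <;> omega

lemma pvLastP_spec (w P : List Char) (k : Nat) :
    (∀ m ∈ P, pvLast1 w m k ≤ pvLastP w P k) ∧
      (pvLastP w P k = -1 ∨ ∃ c ∈ P, pvLast1 w c k = pvLastP w P k) := by
  induction k with
  | zero => simp [pvLast1, pvLastP]
  | succ k ih =>
    obtain ⟨ihl, ihr⟩ := ih
    cases hw : w[k]? with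
    | none =>
      have e2 : pvLastP w P (k + 1) = pvLastP w P k := by simp [pvLastP, hw]
      have e1 : ∀ m : Char, pvLast1 w m (k + 1) = pvLast1 w m k := by
        intro m; simp [pvLast1, hw]
      rw [e2]
      exact ⟨fun m hm => by rw [e1 m]; exact ihl m hm,
        by rcases ihr with h | ⟨c', hc', hv⟩
           · exact Or.inl h
           · exact Or.inr ⟨c', hc', by rw [e1 c']; exact hv⟩⟩
    | some c =>
      have hun : pvLastP w P (k + 1)
          = if (match w[k]? with | some c => P.contains c | none => false) = true then ((k : Nat) : Int) else pvLastP w P k := rfl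
      by_cases hc : P.contains c = true
      · have hcond : (match w[k]? with | some c => P.contains c | none => false) = true := by
          rw [hw]; exact hc
        have e2 : pvLastP w P (k + 1) = (k : Int) := by rw [hun, if_pos hcond]
        rw [e2]
        constructor
        · intro m hm
          have := (pvLast1_bounds w m (k + 1)).2
          omega
        · refine Or.inr ⟨c, by simpa using hc, ?_⟩
          simp [pvLast1, hw]
      · have hne : ∀ m ∈ P, c ≠ m := fun m hm heq => hc (by rw [heq]; simpa using hm)
        have hcond : (match w[k]? with | some c => P.contains c | none => false) = false := by
          rw [hw]; exact Bool.eq_false_iff.mpr hc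
        have e2 : pvLastP w P (k + 1) = pvLastP w P k := by
          rw [hun, if_neg (by rw [hcond]; exact Bool.false_ne_true)]
        have e1 : ∀ m ∈ P, pvLast1 w m (k + 1) = pvLast1 w m k := by
          intro m hm
          simp [pvLast1, hw, hne m hm]
        rw [e2]
        constructor
        · intro m hm; rw [e1 m hm]; exact ihl m hm
        · rcases ihr with h | ⟨c', hc', hv⟩
          · exact Or.inl h
          · exact Or.inr ⟨c', hc', by rw [e1 c' hc']; exact hv⟩

lemma max?_go (g : Option Int → Int → Option Int)
    (hg : ∀ (m x : Int), g (some m) x = if m < x then some x else some m)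
    (l : List Int) (v u : Int) (h : u ≤ v) (hv : v ∈ l ∨ u = v)
    (hub : ∀ x ∈ l, x ≤ v) :
    List.foldl g (some u) l = some v := by
  induction l generalizing u with
  | nil =>
    rcases hv with h' | h'
    · cases h'
    · simp [h']
  | cons x t ih =>
    rw [List.foldl_cons, hg]
    have hx : x ≤ v := hub x List.mem_cons_self
    have hub' : ∀ y ∈ t, y ≤ v := fun y hy => hub y (List.mem_cons_of_mem _ hy)
    rcases hv with h' | h'
    · rcases List.mem_cons.mp h' with hvx | hvt
      · by_cases hux : u < x
        · rw [if_pos hux]; exact ih x hx (Or.inr hvx.symm) hub'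
        · rw [if_neg hux]
          have huv : u = v := le_antisymm h (by rw [hvx]; exact not_lt.mp hux)
          exact ih u h (Or.inr huv) hub'
      · by_cases hux : u < x
        · rw [if_pos hux]; exact ih x hx (Or.inl hvt) hub'
        · rw [if_neg hux]; exact ih u h (Or.inl hvt) hub'
    · subst h'
      rw [if_neg (not_lt.mpr hx)]
      exact ih u le_rfl (Or.inr rfl) hub'

lemma max?_of (l : List Int) (v : Int) (hv : v ∈ l) (hub : ∀ x ∈ l, x ≤ v) :
    PySem.List.max? l (fun c => c) = some v := by
  unfold PySem.List.max?
  cases l with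
  | nil => cases hv
  | cons x t =>
    rw [List.foldl_cons]
    have hx : x ≤ v := hub x List.mem_cons_self
    have hub' : ∀ y ∈ t, y ≤ v := fun y hy => hub y (List.mem_cons_of_mem _ hy)
    rcases List.mem_cons.mp hv with hvx | hvt
    · exact max?_go _ (fun m y => rfl) t v x hx (Or.inr hvx.symm) hub'
    · exact max?_go _ (fun m y => rfl) t v x hx (Or.inl hvt) hub'

lemma min?_go (g : Option Int → Int → Option Int)
    (hg : ∀ (m x : Int), g (some m) x = if x < m then some x else some m)
    (l : List Int) (v u : Int) (h : v ≤ u) (hv : v ∈ l ∨ u = v)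
    (hlb : ∀ x ∈ l, v ≤ x) :
    List.foldl g (some u) l = some v := by
  induction l generalizing u with
  | nil =>
    rcases hv with h' | h'
    · cases h'
    · simp [h']
  | cons x t ih =>
    rw [List.foldl_cons, hg]
    have hx : v ≤ x := hlb x List.mem_cons_self
    have hlb' : ∀ y ∈ t, v ≤ y := fun y hy => hlb y (List.mem_cons_of_mem _ hy)
    rcases hv with h' | h'
    · rcases List.mem_cons.mp h' with hvx | hvt
      · by_cases hux : x < u
        · rw [if_pos hux]; exact ih x hx (Or.inr hvx.symm) hlb'
        · rw [if_neg hux]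
          have huv : u = v := le_antisymm (by rw [hvx]; exact not_lt.mp hux) h
          exact ih u h (Or.inr huv) hlb'
      · by_cases hux : x < u
        · rw [if_pos hux]; exact ih x hx (Or.inl hvt) hlb'
        · rw [if_neg hux]; exact ih u h (Or.inl hvt) hlb'
    · subst h'
      rw [if_neg (not_lt.mpr hx)]
      exact ih u le_rfl (Or.inr rfl) hlb'

lemma min?_of (l : List Int) (v : Int) (hv : v ∈ l) (hlb : ∀ x ∈ l, v ≤ x) :
    PySem.List.min? l (fun c => c) = some v := by
  unfold PySem.List.min?
  cases l with
  | nil => cases hv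
  | cons x t =>
    rw [List.foldl_cons]
    have hx : v ≤ x := hlb x List.mem_cons_self
    have hlb' : ∀ y ∈ t, v ≤ y := fun y hy => hlb y (List.mem_cons_of_mem _ hy)
    rcases List.mem_cons.mp hv with hvx | hvt
    · exact min?_go _ (fun m y => rfl) t v x hx (Or.inr hvx.symm) hlb'
    · exact min?_go _ (fun m y => rfl) t v x hx (Or.inl hvt) hlb'

lemma rfindFrom_eval (s : List Char) (m : Char) (start e0 : Int) (h0 : 0 ≤ start) :
    PySem.Chars.rfindFrom s [m] start (some e0) =
      (if max 0 (min (if e0 < 0 then e0 + (s.length : Int) else e0) (s.length : Int)) < start then -1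
       else if pvLast1 ((List.take (max 0 (min (if e0 < 0 then e0 + (s.length : Int) else e0) (s.length : Int))).toNat s).drop start.toNat) m
              ((List.take (max 0 (min (if e0 < 0 then e0 + (s.length : Int) else e0) (s.length : Int))).toNat s).drop start.toNat).length = -1 then -1
       else start + pvLast1 ((List.take (max 0 (min (if e0 < 0 then e0 + (s.length : Int) else e0) (s.length : Int))).toNat s).drop start.toNat) m
              ((List.take (max 0 (min (if e0 < 0 then e0 + (s.length : Int) else e0) (s.length : Int))).toNat s).drop start.toNat).length) := by
  have hn : (0 : Int) ≤ (s.length : Int) := Int.natCast_nonneg _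
  simp only [PySem.Chars.rfindFrom]
  rw [if_neg (not_lt.mpr h0)]
  have he : (if (s.length : Int) < e0 then (s.length : Int)
      else if e0 < 0 then (if e0 + (s.length : Int) < 0 then 0 else e0 + (s.length : Int)) else e0)
      = max 0 (min (if e0 < 0 then e0 + (s.length : Int) else e0) (s.length : Int)) := by
    split_ifs <;> omega
  rw [he, rfind_single]

lemma pvFirst1_bounds (w : List Char) (m : Char) :
    -1 ≤ pvFirst1 w m ∧ pvFirst1 w m < w.length := by
  induction w with
  | nil => simp [pvFirst1]
  | cons c t ih =>
    simp only [pvFirst1, List.length_cons]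
    obtain ⟨h1, h2⟩ := ih
    split_ifs <;> constructor <;> push_cast <;> omega

lemma pvFirstP_bounds (w P : List Char) :
    -1 ≤ pvFirstP w P ∧ pvFirstP w P < w.length := by
  induction w with
  | nil => simp [pvFirstP]
  | cons c t ih =>
    simp only [pvFirstP, List.length_cons]
    obtain ⟨h1, h2⟩ := ih
    split_ifs <;> constructor <;> push_cast <;> omega

lemma find_go_eq (m : Char) (w : List Char) : ∀ k : Nat,
    PySem.Chars.find.go [m] w k = if pvFirst1 w m = -1 then -1 else (k : Int) + pvFirst1 w m := by
  induction w with
  | nil => intro k; simp [PySem.Chars.find.go, pvFirst1]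
  | cons c t ih =>
    intro k
    have e : PySem.Chars.find.go [m] (c :: t) k
        = if [m].isPrefixOf (c :: t) = true then (k : Int) else PySem.Chars.find.go [m] t (k + 1) := by
      simp [PySem.Chars.find.go]
    rw [e]
    by_cases hc : c = m
    · rw [if_pos (by simp [List.isPrefixOf, hc])]
      simp [pvFirst1, hc]
    · rw [if_neg (by simp [List.isPrefixOf]; exact fun h => hc h.symm)]
      rw [ih (k + 1)]
      simp only [pvFirst1, if_neg hc]
      have hb := (pvFirst1_bounds t m).1
      split_ifs <;> push_cast <;> omega

lemma find_single (w : List Char) (m : Char) :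
    PySem.Chars.find w [m] = pvFirst1 w m := by
  rw [PySem.Chars.find, find_go_eq]
  split_ifs <;> omega

lemma pvFirstP_spec (w P : List Char) :
    (∀ m ∈ P, pvFirst1 w m = -1 ∨ pvFirstP w P ≤ pvFirst1 w m) ∧
      (pvFirstP w P = -1 → ∀ m ∈ P, pvFirst1 w m = -1) ∧
      (pvFirstP w P ≠ -1 → ∃ c ∈ P, pvFirst1 w c = pvFirstP w P) := by
  induction w with
  | nil => simp [pvFirst1, pvFirstP]
  | cons c t ih =>
    obtain ⟨ihl, ihm, ihr⟩ := ih
    by_cases hc : P.contains c = true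
    · have hP : pvFirstP (c :: t) P = 0 := by
        rw [show pvFirstP (c :: t) P
            = if P.contains c = true then 0 else (if pvFirstP t P = -1 then -1 else pvFirstP t P + 1) from rfl,
          if_pos hc]
      refine ⟨fun m hm => ?_, fun h => ?_, fun _ => ⟨c, by simpa using hc, ?_⟩⟩
      · rw [hP]
        by_cases h1 : pvFirst1 (c :: t) m = -1
        · exact Or.inl h1
        · right
          have := (pvFirst1_bounds (c :: t) m).1
          omega
      · rw [hP] at h; exact absurd h (by norm_num)
      · rw [hP]; simp [pvFirst1]
    · have hne : ∀ m ∈ P, c ≠ m := fun m hm heq => hc (by rw [heq]; simpa using hm)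
      have hP : pvFirstP (c :: t) P = if pvFirstP t P = -1 then -1 else pvFirstP t P + 1 := by
        rw [show pvFirstP (c :: t) P
            = if P.contains c = true then 0 else (if pvFirstP t P = -1 then -1 else pvFirstP t P + 1) from rfl,
          if_neg hc]
      have h1 : ∀ m ∈ P, pvFirst1 (c :: t) m
          = if pvFirst1 t m = -1 then -1 else pvFirst1 t m + 1 := by
        intro m hm
        simp only [pvFirst1]
        rw [if_neg (hne m hm)]
      refine ⟨fun m hm => ?_, fun h => ?_, fun h => ?_⟩
      · rw [h1 m hm, hP]
        by_cases h3 : pvFirst1 t m = -1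
        · left; rw [if_pos h3]
        · right
          rw [if_neg h3]
          rcases ihl m hm with h2 | h2
          · exact absurd h2 h3
          · have hb := (pvFirstP_bounds t P).1
            split_ifs <;> omega
      · rw [hP] at h
        have ht : pvFirstP t P = -1 := by
          rcases eq_or_ne (pvFirstP t P) (-1) with h' | h'
          · exact h'
          · rw [if_neg h'] at h
            have := (pvFirstP_bounds t P).1
            omega
        intro m hm
        rw [h1 m hm, if_pos (ihm ht m hm)]
      · rw [hP] at h ⊢
        have ht : pvFirstP t P ≠ -1 := by
          rcases eq_or_ne (pvFirstP t P) (-1) with h' | h'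
          · rw [if_pos h'] at h; exact absurd rfl h
          · exact h'
        obtain ⟨c', hc', hv⟩ := ihr ht
        refine ⟨c', hc', ?_⟩
        rw [if_neg ht, h1 c' hc', hv, if_neg ht]

lemma findFrom_eval (s : List Char) (m : Char) (start e0 : Int) (he0 : 0 ≤ e0) :
    PySem.Chars.findFrom s [m] start (some e0) =
      (if min e0 (s.length : Int) < (if start < 0 then max 0 (start + (s.length : Int)) else start) then -1
       else if pvFirst1 ((List.take (min e0 (s.length : Int)).toNat s).drop (if start < 0 then max 0 (start + (s.length : Int)) else start).toNat) m = -1 then -1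
       else (if start < 0 then max 0 (start + (s.length : Int)) else start)
         + pvFirst1 ((List.take (min e0 (s.length : Int)).toNat s).drop (if start < 0 then max 0 (start + (s.length : Int)) else start).toNat) m) := by
  have hn : (0 : Int) ≤ (s.length : Int) := Int.natCast_nonneg _
  simp only [PySem.Chars.findFrom]
  have he : (if (s.length : Int) < e0 then (s.length : Int)
      else if e0 < 0 then (if e0 + (s.length : Int) < 0 then 0 else e0 + (s.length : Int)) else e0)
      = min e0 (s.length : Int) := by split_ifs <;> omega
  have hst : (if start < 0 then (if start + (s.length : Int) < 0 then 0 else start + (s.length : Int)) else start)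
      = (if start < 0 then max 0 (start + (s.length : Int)) else start) := by split_ifs <;> omega
  rw [he, hst, find_single]

lemma forward_max (w : List Char) (st : Int) (hst : 0 ≤ st) :
    PySem.List.max? (pvMarks.map (fun m => if pvLast1 w m w.length = -1 then -1 else st + pvLast1 w m w.length)) (fun c => c)
      = some (if pvLastP w pvMarks w.length = -1 then -1 else st + pvLastP w pvMarks w.length) := by
  obtain ⟨hle, hex⟩ := pvLastP_spec w pvMarks w.length
  apply max?_of
  · rcases hex with h | ⟨c, hc, hv⟩
    · rw [if_pos h]
      refine List.mem_map.mpr ⟨'.', by simp [pvMarks], ?_⟩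
      have h1 := hle '.' (by simp [pvMarks])
      have h2 := (pvLast1_bounds w '.' w.length).1
      rw [if_pos (by omega)]
    · by_cases h : pvLastP w pvMarks w.length = -1
      · rw [if_pos h]
        refine List.mem_map.mpr ⟨c, hc, ?_⟩
        rw [hv, h, if_pos rfl]
      · rw [if_neg h]
        exact List.mem_map.mpr ⟨c, hc, by rw [hv, if_neg h]⟩
  · intro x hx
    obtain ⟨m, hm, hv⟩ := List.mem_map.mp hx
    have h1 := hle m hm
    have h2 := (pvLast1_bounds w m w.length).1
    have h3 := (pvLastP_bounds w pvMarks w.length).1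
    rw [← hv]
    split_ifs <;> omega

lemma backward_min (w : List Char) (st : Int) (hst : 0 ≤ st) :
    PySem.List.min? ((pvMarks.map (fun m => if pvFirst1 w m = -1 then -1 else st + pvFirst1 w m)).filter (fun c => 0 ≤ c)) (fun c => c)
      = if pvFirstP w pvMarks = -1 then none else some (st + pvFirstP w pvMarks) := by
  obtain ⟨hle, hall, hex⟩ := pvFirstP_spec w pvMarks
  by_cases hp : pvFirstP w pvMarks = -1
  · rw [if_pos hp]
    have hnil : (pvMarks.map (fun m => if pvFirst1 w m = -1 then -1 else st + pvFirst1 w m)).filter (fun c => (0:Int) ≤ c) = [] := by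
      rw [List.filter_eq_nil_iff]
      intro x hx
      obtain ⟨m, hm, hv⟩ := List.mem_map.mp hx
      rw [hall hp m hm] at hv
      simp only [decide_eq_true_eq]
      simp at hv
      omega
    rw [hnil]; rfl
  · rw [if_neg hp]
    have hge : 0 ≤ pvFirstP w pvMarks := by
      have := (pvFirstP_bounds w pvMarks).1; omega
    obtain ⟨c, hc, hv⟩ := hex hp
    apply min?_of
    · rw [List.mem_filter]
      constructor
      · refine List.mem_map.mpr ⟨c, hc, ?_⟩
        rw [hv, if_neg hp]
      · simp; omega
    · intro x hx
      rw [List.mem_filter] at hx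
      obtain ⟨hx1, hx2⟩ := hx
      obtain ⟨m, hm, hmv⟩ := List.mem_map.mp hx1
      simp at hx2
      rcases hle m hm with h1 | h1
      · rw [h1] at hmv; simp at hmv; omega
      · have hne1 : pvFirst1 w m ≠ -1 := by omega
        rw [if_neg hne1] at hmv
        omega

-- B's slice, written as drop-inside-take so that it lines up with find/rfind's window
lemma slice_drop_take (s : List Char) (a0 b0 : Int) :
    PySem.List.slice s (some a0) (some b0)
      = List.drop (PySem.List.clampIdx s.length a0) (List.take (PySem.List.clampIdx s.length b0) s) := by
  simp only [PySem.List.slice]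
  rw [List.drop_take]

lemma drop_min_eq (l : List Char) (k n : Nat) (hl : l.length ≤ n) :
    l.drop (min k n) = l.drop k := by
  by_cases h : k ≤ n
  · rw [min_eq_left h]
  · rw [min_eq_right (by omega), List.drop_eq_nil_of_le hl, List.drop_eq_nil_of_le (by omega)]

lemma scanBack_eq (w : List Char) (lo d : Int) :
    ∀ k : Nat, k ≤ w.length →
    pvScanBack w ['.', ';', ':', '!', '?'] lo k d
      = if pvLastP w pvMarks k = -1 then d else lo + pvLastP w pvMarks k + 1 := by
  intro k
  induction k with
  | zero => intro _; simp [pvScanBack, pvLastP]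
  | succ k ih =>
    intro hk
    have hlt : k < w.length := by omega
    have hget : w.getD k ' ' = w[k] := List.getD_eq_getElem w ' ' hlt
    have hwk : w[k]? = some w[k] := List.getElem?_eq_getElem hlt
    have hun : pvLastP w pvMarks (k + 1)
        = if (match w[k]? with | some c => pvMarks.contains c | none => false) = true
          then ((k : Nat) : Int) else pvLastP w pvMarks k := rfl
    rw [show pvScanBack w ['.', ';', ':', '!', '?'] lo (k + 1) d
        = if pvMarks.contains (w.getD k ' ') = true then lo + (k : Int) + 1
          else pvScanBack w ['.', ';', ':', '!', '?'] lo k d from rfl]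
    by_cases hmem : pvMarks.contains w[k] = true
    · have hcond : (match w[k]? with | some c => pvMarks.contains c | none => false) = true := by
        rw [hwk]; exact hmem
      have hstep : pvLastP w pvMarks (k + 1) = (k : Int) := by rw [hun, hcond]; simp
      rw [hget, if_pos hmem, hstep, if_neg (show ¬((k : Int) = -1) by omega)]
    · have hcond : (match w[k]? with | some c => pvMarks.contains c | none => false) = false := by
        rw [hwk]; exact Bool.eq_false_iff.mpr hmem
      have hstep : pvLastP w pvMarks (k + 1) = pvLastP w pvMarks k := by rw [hun, hcond]; simp
      rw [hget, if_neg hmem, ih (by omega), hstep]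

lemma scanFwd_eq (w : List Char) (base d : Int) :
    ∀ i : Int, pvScanFwd ['.', ';', ':', '!', '?'] base (PySem.List.enumerate w i) d
      = if pvFirstP w pvMarks = -1 then d else base + i + pvFirstP w pvMarks + 1 := by
  induction w with
  | nil => intro i; simp [pvScanFwd, pvFirstP, PySem.List.enumerate_nil]
  | cons c t ih =>
    intro i
    rw [PySem.List.enumerate_cons]
    rw [show pvScanFwd ['.', ';', ':', '!', '?'] base ((i, c) :: PySem.List.enumerate t (i + 1)) d
        = if pvMarks.contains c = true then base + i + 1
          else pvScanFwd ['.', ';', ':', '!', '?'] base (PySem.List.enumerate t (i + 1)) d from rfl]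
    have hun : pvFirstP (c :: t) pvMarks
        = if pvMarks.contains c = true then 0
          else (if pvFirstP t pvMarks = -1 then -1 else pvFirstP t pvMarks + 1) := rfl
    by_cases hmem : pvMarks.contains c = true
    · rw [if_pos hmem, hun, if_pos hmem, if_neg (by omega)]; omega
    · rw [if_neg hmem, ih (i + 1), hun, if_neg hmem]
      have hb := (pvFirstP_bounds t pvMarks).1
      by_cases h1 : pvFirstP t pvMarks = -1
      · rw [if_pos h1, if_pos (by rw [if_pos h1])]
      · rw [if_neg h1,
          if_neg (show ¬((if pvFirstP t pvMarks = -1 then (-1 : Int) else pvFirstP t pvMarks + 1) = -1) from by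
            rw [if_neg h1]; omega),
          if_neg h1]
        omega

lemma toList_mk_single (m : Char) : (String.ofList [m]).toList = [m] := by
  rw [String.toList_ofList]

-- ===== VERDICT (by name: the statement is the Claim_ definition above) =====
theorem move_to_sentence_boundary_py_spec : Claim_equal_move_to_sentence_boundary_py := by
  intro text b a f _dom
  unfold Spec_move_to_sentence_boundary_py
  unfold move_to_sentence_boundary_py move_to_sentence_boundary_py_alt
  dsimp only
  set s := text.toList with hs
  have hlen : PySem.Str.len text = (s.length : Int) := by rw [PySem.Str.len_eq]
  rw [hlen]
  by_cases hout : b ≤ 0 ∨ (s.length : Int) ≤ b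
  · rw [if_pos hout, if_pos hout]
  · rw [if_neg hout, if_neg hout]
    push_neg at hout
    obtain ⟨hb0, hbn⟩ := hout
    have hn0 : (0 : Int) ≤ (s.length : Int) := Int.natCast_nonneg _
    cases f with
    | true =>
      rw [if_pos rfl, if_pos rfl]
      set st : Int := max 0 (b - 300) with hstdef
      set e0 : Int := min a (b + 300) with he0def
      have hst0 : 0 ≤ st := le_max_left _ _
      have hstn : st ≤ (s.length : Int) := by omega
      set e : Int := max 0 (min (if e0 < 0 then e0 + (s.length : Int) else e0) (s.length : Int)) with hedef
      set w : List Char := (List.take e.toNat s).drop st.toNat with hwdef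
      have hen : e ≤ (s.length : Int) := by rw [hedef]; omega
      have he0' : 0 ≤ e := le_max_left _ _
      -- B's slice is exactly the window of A's rfind
      have hwin : PySem.List.slice s (some st) (some e0) = w := by
        rw [slice_drop_take]
        have ha' : PySem.List.clampIdx s.length st = st.toNat := by
          simp only [PySem.List.clampIdx]
          split_ifs <;> omega
        have hb' : PySem.List.clampIdx s.length e0 = e.toNat := by
          simp only [PySem.List.clampIdx]
          rw [hedef]
          split_ifs <;> omega
        rw [ha', hb', hwdef]
      rw [hwin]
      have heval : ∀ m : Char, PySem.Str.rfindFrom text (String.ofList [m]) st (some e0) =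
          (if e < st then -1
           else if pvLast1 w m w.length = -1 then -1 else st + pvLast1 w m w.length) := by
        intro m
        rw [PySem.Str.rfindFrom_eq, toList_mk_single, rfindFrom_eval s m st e0 hst0]
        try rw [← hedef, ← hwdef]
      have hwlen : w.length = e.toNat - st.toNat := by
        rw [hwdef, List.length_drop, List.length_take]
        omega
      have hscan := scanBack_eq w st b w.length (le_refl _)
      by_cases hcmp : e < st
      · -- empty window: every rfind is -1, A returns boundary; B's slice is empty
        have h5 : ∀ (x y : Int), (if e < st then x else y) = x := fun x y => if_pos hcmp
        have hmap : pvMarks.map (fun mark => PySem.Str.rfindFrom text (String.ofList [mark]) st (some e0)) = [-1, -1, -1, -1, -1] := by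
          simp only [pvMarks, List.map, heval, h5]
        rw [hmap]
        have hmax : PySem.List.max? [(-1 : Int), -1, -1, -1, -1] (fun c => c) = some (-1) :=
          max?_of _ _ (by simp) (by intro x hx; simp at hx; omega)
        rw [hmax]
        have hw0 : w.length = 0 := by omega
        rw [hscan, hw0]
        rw [if_pos (by simp [pvLastP])]
        exact rfl
      · push_neg at hcmp
        have h5 : ∀ (x y : Int), (if e < st then x else y) = y := fun x y => if_neg (by omega)
        have hmap : pvMarks.map (fun mark => PySem.Str.rfindFrom text (String.ofList [mark]) st (some e0)) =
            pvMarks.map (fun m => if pvLast1 w m w.length = -1 then -1 else st + pvLast1 w m w.length) := by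
          simp only [pvMarks, List.map, heval, h5]
        rw [hmap, forward_max w st hst0, hscan]
        dsimp only
        by_cases hlp : pvLastP w pvMarks w.length = -1
        · rw [if_pos hlp, if_pos hlp]
          rw [if_neg (by norm_num)]
        · have hb1 := (pvLastP_bounds w pvMarks w.length).1
          have hb2 := (pvLastP_bounds w pvMarks w.length).2
          rw [if_neg hlp, if_neg hlp]
          rw [if_pos (by omega)]
          have hwI : (w.length : Int) = e - st := by omega
          omega
    | false =>
      rw [if_neg (by simp), if_neg (by simp)]
      set st0 : Int := max a (b - 300) with hst0def
      set st : Int := if st0 < 0 then max 0 (st0 + (s.length : Int)) else st0 with hstdef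
      have hst0 : 0 ≤ st := by rw [hstdef]; split_ifs <;> omega
      have hee : min b (s.length : Int) = b := min_eq_left (by omega)
      set w : List Char := (List.take b.toNat s).drop st.toNat with hwdef
      -- B's slice is exactly the window of A's find
      have hwin : PySem.List.slice s (some st0) (some b) = w := by
        rw [slice_drop_take]
        have hb' : PySem.List.clampIdx s.length b = b.toNat := by
          simp only [PySem.List.clampIdx]
          split_ifs <;> omega
        have ha' : PySem.List.clampIdx s.length st0 = min st.toNat s.length := by
          simp only [PySem.List.clampIdx]
          rw [hstdef]
          split_ifs <;> omega
        rw [ha', hb', hwdef]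
        exact drop_min_eq _ _ _ (by rw [List.length_take]; omega)
      rw [hwin]
      have heval : ∀ m : Char, PySem.Str.findFrom text (String.ofList [m]) st0 (some b) =
          (if b < st then -1
           else if pvFirst1 w m = -1 then -1 else st + pvFirst1 w m) := by
        intro m
        rw [PySem.Str.findFrom_eq, toList_mk_single, findFrom_eval s m st0 b (by omega)]
        rw [← hstdef, hee, ← hwdef]
      have hwlen : (w.length : Int) = min b (s.length : Int) - min st (s.length : Int) ∨ w.length = 0 := by
        rw [hwdef, List.length_drop, List.length_take]
        by_cases h : st ≤ b
        · left; omega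
        · right; omega
      have hscan := scanFwd_eq w (b - (w.length : Int)) b 0
      rw [hscan]
      by_cases hcmp : b < st
      · -- empty window: every find is -1, the kept list is empty, A returns boundary
        have h5 : ∀ (x y : Int), (if b < st then x else y) = x := fun x y => if_pos hcmp
        have hmap : pvMarks.map (fun mark => PySem.Str.findFrom text (String.ofList [mark]) st0 (some b)) = [-1, -1, -1, -1, -1] := by
          simp only [pvMarks, List.map, heval, h5]
        rw [hmap]
        have hfil : List.filter (fun candidate => decide ((0:Int) ≤ candidate)) [(-1:Int), -1, -1, -1, -1] = [] := by decide
        rw [hfil]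
        have hw0 : w.length = 0 := by
          rw [hwdef, List.length_drop, List.length_take]
          omega
        have hlp : pvFirstP w pvMarks = -1 := by
          rw [List.length_eq_zero_iff.mp hw0]; rfl
        rw [if_pos hlp]
        rfl
      · push_neg at hcmp
        have h5 : ∀ (x y : Int), (if b < st then x else y) = y := fun x y => if_neg (by omega)
        have hmap : pvMarks.map (fun mark => PySem.Str.findFrom text (String.ofList [mark]) st0 (some b)) =
            pvMarks.map (fun m => if pvFirst1 w m = -1 then -1 else st + pvFirst1 w m) := by
          simp only [pvMarks, List.map, heval, h5]
        rw [hmap, backward_min w st hst0]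
        by_cases hfp : pvFirstP w pvMarks = -1
        · rw [if_pos hfp, if_pos hfp]
        · rw [if_neg hfp, if_neg hfp]
          dsimp only
          have hb1 := (pvFirstP_bounds w pvMarks).1
          have hb2 := (pvFirstP_bounds w pvMarks).2
          have hwl : w.length = b.toNat - st.toNat := by
            rw [hwdef, List.length_drop, List.length_take]
            omega
          omega
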